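-- pv_equiv track=rewrite | github.com/UGeunJi/Coding_Test_Practice | Coding Basic Training/왼쪽 오른쪽.py | solution
-- ===== SOURCE A (Python) =====
-- def solution(str_list):
--     answer = []
--     str_list = ''.join(str_list)
--
--     for i in range(len(str_list)):
--         if str_list[i] == 'l':
--             answer = str_list[:i]
--             break
--         elif str_list[i] == 'r':
--             answer = str_list[i + 1:]
--             break
--
--     if len(answer) == 0:
--         return []
--     else:
--         return list(answer)
-- ===== SOURCE B (Python) =====
-- def solution(str_list):
--     # Single streaming pass over the list of strings (no join, no slicing of a
--     # joined string): emit characters into acc until a marker is met.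
--     acc = []
--     for k in range(len(str_list)):
--         s = str_list[k]
--         for j in range(len(s)):
--             c = s[j]
--             if c == 'l':
--                 return acc
--             if c == 'r':
--                 tail = list(s[j + 1:])
--                 for t in str_list[k + 1:]:
--                     tail.extend(t)
--                 return tail
--             acc.append(c)
--     return []
-- ===== Notes on version B (the rewrite author's own statement) =====
-- stated objective: alternative
-- what changed: B never joins the input into one string: it streams over the list of strings with an accumulator of already-emitted characters and returns early at the first marker ('l' -> the accumulator, 'r' -> the remaining characters collected by extending a tail list), where A joins first and then does an indexed scan with slicing of the joined string.
import Mathlib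
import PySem

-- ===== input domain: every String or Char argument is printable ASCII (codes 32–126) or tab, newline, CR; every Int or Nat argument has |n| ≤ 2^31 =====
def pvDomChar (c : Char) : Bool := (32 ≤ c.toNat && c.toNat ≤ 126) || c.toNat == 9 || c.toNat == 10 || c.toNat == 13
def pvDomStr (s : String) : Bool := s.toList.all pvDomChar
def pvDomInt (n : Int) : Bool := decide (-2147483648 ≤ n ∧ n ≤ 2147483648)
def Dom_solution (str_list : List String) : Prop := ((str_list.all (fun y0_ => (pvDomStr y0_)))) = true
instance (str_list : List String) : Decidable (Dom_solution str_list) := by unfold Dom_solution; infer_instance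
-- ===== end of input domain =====

-- B never joins the input: it streams over the list of strings with an accumulator of
-- emitted characters and returns early at the first marker, instead of A's join + indexed
-- scan + slicing of the joined string; objective: alternative decomposition.

def pvSg (c : Char) : String := String.ofList [c]

-- ===== PORT A =====
-- A's 'for i in range(len(str_list))' with its early break: i is the current index, the last argument is s.drop i
def solLoopA (cs : List Char) (i : Nat) : List Char → List Char
  | [] => []
  | c :: rest =>
    if c = 'l' then cs.take i
    else if c = 'r' then cs.drop (i + 1)
    else solLoopA cs (i + 1) rest

def solution (str_list : List String) : List String :=
  let cs := (PySem.Str.join "" str_list).toList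
  let answer := solLoopA cs 0 cs
  if answer.length = 0 then [] else answer.map pvSg

-- ===== PORT B =====
-- inner loop over the characters of the current string: .inl = early return, .inr = updated acc
def solCharsB (acc : List String) (rest : List String) : List Char → (List String ⊕ List String)
  | [] => .inr acc
  | c :: cs =>
    if c = 'l' then .inl acc
    else if c = 'r' then
      -- tail = list(s[j+1:]); for t in str_list[k+1:]: tail.extend(t)
      .inl (rest.foldl (fun t s => t ++ s.toList.map pvSg) (cs.map pvSg))
    else solCharsB (acc ++ [pvSg c]) rest cs

-- outer loop over the strings
def solOuterB (acc : List String) : List String → List String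
  | [] => []
  | s :: rest =>
    match solCharsB acc rest s.toList with
    | .inl ans => ans
    | .inr acc' => solOuterB acc' rest

def solution_alt (str_list : List String) : List String := solOuterB [] str_list

-- ===== PRECONDITION & SPEC =====
def Spec_solution (str_list : List String) (out : List String) : Prop := out = solution_alt str_list
instance (str_list : List String) (out : List String) : Decidable (Spec_solution str_list out) := by unfold Spec_solution; infer_instance

-- ===== CLAIM (what is proved, stated in full; the proofs are below) =====
def Claim_equal_solution : Prop := ∀ (str_list : List String), Dom_solution str_list → Spec_solution str_list (solution str_list)

-- ===== LEMMAS AND PROOFS =====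

-- the first marker of a character list: (marker, text before it, text after it)
def fm : List Char → Option (Char × List Char × List Char)
  | [] => none
  | c :: cs =>
    if c = 'l' ∨ c = 'r' then some (c, [], cs)
    else (fm cs).map fun p => (p.1, c :: p.2.1, p.2.2)

lemma inter_nil {α : Type} (L : List (List α)) : List.intercalate [] L = L.flatten := by
  induction L with
  | nil => simp [List.intercalate]
  | cons a t ih =>
    cases t with
    | nil => simp [List.intercalate]
    | cons b t' =>
      simp only [List.intercalate, List.intersperse] at *
      simp_all

lemma join_empty (ss : List String) :
    (PySem.Str.join "" ss).toList = ss.flatMap String.toList := by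
  rw [PySem.Str.toList_join]
  show List.intercalate "".toList _ = _
  rw [show "".toList = ([] : List Char) from rfl, inter_nil, List.flatten_eq_flatMap,
    List.flatMap_map]
  rfl

-- A's loop computes: nothing without a marker, the prefix before an 'l', the suffix after an 'r'
lemma loopA_fm : ∀ (rest pre : List Char), solLoopA (pre ++ rest) pre.length rest =
    (match fm rest with
     | none => []
     | some (m, b, a) => if m = 'l' then pre ++ b else a) := by
  intro rest
  induction rest with
  | nil => intro pre; simp [solLoopA, fm]
  | cons c rest ih =>
    intro pre
    by_cases hl : c = 'l'
    · simp [solLoopA, fm, hl]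
    · by_cases hr : c = 'r'
      · simp [solLoopA, fm, hr, List.drop_append]
      · have := ih (pre ++ [c])
        simp only [List.append_assoc, List.singleton_append] at this
        simp only [solLoopA, fm, hl, hr, or_self, if_false]
        rw [show pre.length + 1 = (pre ++ [c]).length by simp] at *
        rw [this]
        cases fm rest with
        | none => simp
        | some p =>
          obtain ⟨m, b, a⟩ := p
          by_cases hm : m = 'l' <;> simp [hm]

-- the tail-collecting foldl of B appends all characters of the remaining strings
lemma foldB_flat : ∀ (rest : List String) (init : List String),
    rest.foldl (fun t s => t ++ s.toList.map pvSg) init =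
      init ++ (rest.flatMap String.toList).map pvSg := by
  intro rest
  induction rest with
  | nil => intro init; simp
  | cons s rest ih => intro init; simp [List.foldl_cons, ih]

-- B's inner loop, characterised by the first marker of the current string
lemma charsB_fm : ∀ (cs : List Char) (acc rest : List String),
    solCharsB acc rest cs =
      (match fm cs with
       | none => .inr (acc ++ cs.map pvSg)
       | some (m, b, a) =>
         .inl (if m = 'l' then acc ++ b.map pvSg
               else (a ++ rest.flatMap String.toList).map pvSg)) := by
  intro cs
  induction cs with
  | nil => intro acc rest; simp [solCharsB, fm]
  | cons c cs ih =>
    intro acc rest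
    by_cases hl : c = 'l'
    · simp [solCharsB, fm, hl]
    · by_cases hr : c = 'r'
      · rw [show solCharsB acc rest (c :: cs) = .inl (rest.foldl (fun t s => t ++ s.toList.map pvSg) (cs.map pvSg)) by simp [solCharsB, hr]]
        rw [foldB_flat]
        simp [fm, hr, List.map_append, List.map_flatMap]
      · simp only [solCharsB, fm, hl, hr, if_false, or_self]
        rw [ih]
        cases fm cs with
        | none => simp
        | some p =>
          obtain ⟨m, b, a⟩ := p
          by_cases hm : m = 'l' <;> simp [hm]

-- fm over a concatenation: the first marker of xs wins, otherwise look in ys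
lemma fm_append : ∀ (xs ys : List Char),
    fm (xs ++ ys) =
      (match fm xs with
       | some (m, b, a) => some (m, b, a ++ ys)
       | none => (fm ys).map fun p => (p.1, xs ++ p.2.1, p.2.2)) := by
  intro xs ys
  induction xs with
  | nil =>
    simp only [List.nil_append, fm]
    cases fm ys with
    | none => rfl
    | some p => obtain ⟨m, b, a⟩ := p; rfl
  | cons c xs ih =>
    by_cases hc : c = 'l' ∨ c = 'r'
    · simp [fm, hc]
    · simp only [List.cons_append, fm, hc, if_false]
      rw [ih]
      cases fm xs with
      | none =>
        cases fm ys with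
        | none => rfl
        | some p => obtain ⟨m, b, a⟩ := p; rfl
      | some p => obtain ⟨m, b, a⟩ := p; rfl

-- B's outer loop, characterised by the first marker of the flattened input
lemma outerB_fm : ∀ (ss : List String) (acc : List String),
    solOuterB acc ss =
      (match fm (ss.flatMap String.toList) with
       | none => []
       | some (m, b, a) => if m = 'l' then acc ++ b.map pvSg else a.map pvSg) := by
  intro ss
  induction ss with
  | nil => intro acc; simp [solOuterB, fm]
  | cons s rest ih =>
    intro acc
    simp only [solOuterB, List.flatMap_cons]
    rw [charsB_fm, fm_append]
    cases hfs : fm s.toList with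
    | some p =>
      obtain ⟨m, b, a⟩ := p
      by_cases hm : m = 'l' <;> simp [hm]
    | none =>
      simp only []
      rw [ih]
      cases fm (rest.flatMap String.toList) with
      | none => rfl
      | some p =>
        obtain ⟨m, b, a⟩ := p
        by_cases hm : m = 'l' <;> simp [hm]

-- ===== VERDICT (by name: the statement is the Claim_ definition above) =====
theorem solution_spec : Claim_equal_solution := by
  intro str_list _
  unfold Spec_solution
  simp only [solution, solution_alt]
  have hA := loopA_fm ((PySem.Str.join "" str_list).toList) []
  simp only [List.nil_append, List.length_nil] at hA
  rw [hA, outerB_fm, join_empty]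
  cases fm (str_list.flatMap String.toList) with
  | none => simp
  | some p =>
    obtain ⟨m, b, a⟩ := p
    by_cases hm : m = 'l'
    · simp only [hm, List.nil_append]
      cases b <;> simp
    · simp only [hm, if_false]
      cases a <;> simp
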